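-- pv_equiv track=rewrite | github.com/Fattehh/BPE-for-Knowledge-Graph-Embeddings | custom_BytE_util.py | shell_loop_from_loops
-- ===== SOURCE A (Python) =====
-- def shell_loop_from_loops(commands: list[str], loop_names: list[str], loops: list[list[str]],
--                           indent: int = 0) -> str:
--     if len(loops) == 0:
--         if loop_names:
--             cmds = "\n".join(
--                 [" " * indent + "%s " % cmd + " ".join(
--                     ["--%s $%s" % (name, name) for name in loop_names if name != "training_kg"]) for cmd in commands])
--         else:
--             cmds = "\n".join([" " * indent + "%s" % cmd for cmd in commands])
--         return cmds + "\n"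
--     else:
--         shell_loop = " " * indent + " ".join(["for", loop_names[-len(loops)], "in", *loops[0]]) + "; do\n"
--         shell_loop += shell_loop_from_loops(commands, loop_names, loops[1:], indent + 2)
--         shell_loop += " " * indent + "done\n"
--     return shell_loop
-- ===== SOURCE B (Python) =====
-- def shell_loop_from_loops(commands: list[str], loop_names: list[str], loops: list[list[str]],
--                           indent: int = 0) -> str:
--     n = len(loops)
--     inner = indent + 2 * n
--     if loop_names:
--         opts = " ".join(["--%s $%s" % (name, name) for name in loop_names if name != "training_kg"])
--         acc = "\n".join([" " * inner + cmd + " " + opts for cmd in commands]) + "\n"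
--     else:
--         acc = "\n".join([" " * inner + cmd for cmd in commands]) + "\n"
--     for k in range(n - 1, -1, -1):
--         pad = " " * (indent + 2 * k)
--         acc = (pad + " ".join(["for", loop_names[-(n - k)], "in", *loops[k]]) + "; do\n"
--                + acc + pad + "done\n")
--     return acc
-- ===== Notes on version B (the rewrite author's own statement) =====
-- stated objective: alternative
-- what changed: Replaces A's recursion over loops with an iterative build: construct the innermost command block once at indent+2*len(loops), then wrap it in for/done headers from the innermost level outward in a single reverse-range loop.
import Mathlib
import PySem

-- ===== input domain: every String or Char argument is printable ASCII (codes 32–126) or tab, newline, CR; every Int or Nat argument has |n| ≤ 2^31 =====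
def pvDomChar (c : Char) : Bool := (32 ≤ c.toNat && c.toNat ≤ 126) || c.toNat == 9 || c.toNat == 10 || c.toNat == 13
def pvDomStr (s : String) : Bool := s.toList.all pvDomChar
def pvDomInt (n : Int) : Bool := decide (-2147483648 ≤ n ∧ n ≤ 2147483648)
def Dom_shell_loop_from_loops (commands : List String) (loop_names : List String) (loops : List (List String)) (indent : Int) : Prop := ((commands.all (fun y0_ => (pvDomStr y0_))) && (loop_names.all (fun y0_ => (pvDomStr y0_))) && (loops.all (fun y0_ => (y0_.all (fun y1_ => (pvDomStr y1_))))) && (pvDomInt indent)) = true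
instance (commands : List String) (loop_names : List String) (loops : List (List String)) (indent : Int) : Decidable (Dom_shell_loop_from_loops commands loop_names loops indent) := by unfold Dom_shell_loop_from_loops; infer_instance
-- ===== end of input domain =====

-- B builds the same script iteratively (innermost command block first, then wrap with
-- for/done headers outward in a reverse-range loop) instead of A's recursion over loops;
-- objective: alternative decomposition, same cost.

-- " " * i  (Python string repetition: empty for i ≤ 0) — shared by both ports, exact
def pvSpaces (i : Int) : String := String.ofList (List.replicate i.toNat ' ')

-- ===== PORT A =====
def shell_loop_from_loops (commands : List String) (loop_names : List String) (loops : List (List String)) (indent : Int) : String :=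
  match loops with
  | [] =>
    let cmds :=
      if loop_names.isEmpty then
        String.intercalate "\n" (commands.map (fun cmd => pvSpaces indent ++ cmd))
      else
        String.intercalate "\n" (commands.map (fun cmd =>
          pvSpaces indent ++ (cmd ++ " ") ++
          String.intercalate " " ((loop_names.filter (fun name => name ≠ "training_kg")).map
            (fun name => "--" ++ name ++ " $" ++ name))))
    cmds ++ "\n"
  | l0 :: rest =>
    -- loop_names[-len(loops)] : negative index; Pre_ excludes the IndexError case
    let shell_loop := pvSpaces indent ++
      String.intercalate " " (["for", (PySem.List.pyGet? loop_names (-((rest.length : Int) + 1))).getD "", "in"] ++ l0) ++ "; do\n"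
    let shell_loop := shell_loop ++ shell_loop_from_loops commands loop_names rest (indent + 2)
    shell_loop ++ pvSpaces indent ++ "done\n"

-- ===== PORT B =====
-- the body of Source B's `for k in range(n-1, -1, -1)` loop, as a named helper
def pvWrapStep (loop_names : List String) (loops : List (List String)) (indent : Int) (n : Int) (acc : String) (k : Int) : String :=
  let pad := pvSpaces (indent + 2 * k)
  pad ++ String.intercalate " " (["for", (PySem.List.pyGet? loop_names (-(n - k))).getD "", "in"] ++ (PySem.List.pyGet? loops k).getD []) ++ "; do\n"
    ++ acc ++ pad ++ "done\n"

def shell_loop_from_loops_alt (commands : List String) (loop_names : List String) (loops : List (List String)) (indent : Int) : String :=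
  let n : Int := loops.length
  let inner : Int := indent + 2 * n
  let acc :=
    if loop_names.isEmpty then
      String.intercalate "\n" (commands.map (fun cmd => pvSpaces inner ++ cmd)) ++ "\n"
    else
      let opts := String.intercalate " " ((loop_names.filter (fun name => name ≠ "training_kg")).map
        (fun name => "--" ++ name ++ " $" ++ name))
      String.intercalate "\n" (commands.map (fun cmd => pvSpaces inner ++ cmd ++ " " ++ opts)) ++ "\n"
  (PySem.List.pyRange (n - 1) (-1) (-1)).foldl (pvWrapStep loop_names loops indent n) acc

-- ===== PRECONDITION & SPEC =====
-- Pre_ excludes exactly the inputs where A raises IndexError: a non-empty loops list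
-- longer than loop_names (loop_names[-len(loops)] is then out of range).
def Pre_shell_loop_from_loops (commands : List String) (loop_names : List String) (loops : List (List String)) (indent : Int) : Prop :=
  loops = [] ∨ loops.length ≤ loop_names.length
instance (commands : List String) (loop_names : List String) (loops : List (List String)) (indent : Int) : Decidable (Pre_shell_loop_from_loops commands loop_names loops indent) := by unfold Pre_shell_loop_from_loops; infer_instance

def pvWitness_shell_loop_from_loops : List String × List String × List (List String) × Int :=
  (["run.py"], ["lr", "dim"], [["0.1", "0.01"], ["32"]], 0)

def Spec_shell_loop_from_loops (commands : List String) (loop_names : List String) (loops : List (List String)) (indent : Int) (out : String) : Prop := out = shell_loop_from_loops_alt commands loop_names loops indent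
instance (commands : List String) (loop_names : List String) (loops : List (List String)) (indent : Int) (out : String) : Decidable (Spec_shell_loop_from_loops commands loop_names loops indent out) := by unfold Spec_shell_loop_from_loops; infer_instance

-- ===== CLAIM (what is proved, stated in full; the proofs are below) =====
def Claim_equal_shell_loop_from_loops : Prop := ∀ (commands : List String) (loop_names : List String) (loops : List (List String)) (indent : Int), Dom_shell_loop_from_loops commands loop_names loops indent → Pre_shell_loop_from_loops commands loop_names loops indent → Spec_shell_loop_from_loops commands loop_names loops indent (shell_loop_from_loops commands loop_names loops indent)

-- ===== LEMMAS AND PROOFS =====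

-- range(1, m+1) is range(0, m) shifted by one
theorem pyRange_shift (m : Int) :
    PySem.List.pyRange 1 (m + 1) 1 = (PySem.List.pyRange 0 m 1).map (fun x => x + 1) := by
  apply List.ext_getElem
  · simp [PySem.List.length_pyRange_one]
  · intro k h1 h2
    simp only [List.getElem_map, PySem.List.getElem_pyRange_one]
    ring

-- B's reverse-range fold unwraps one outermost level: alt on (l0 :: rest) is the level-0
-- header/footer around alt on rest at indent + 2.
theorem alt_cons (commands loop_names : List String) (l0 : List String) (rest : List (List String)) (indent : Int) :
    shell_loop_from_loops_alt commands loop_names (l0 :: rest) indent =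
      pvSpaces indent ++
        String.intercalate " " (["for", (PySem.List.pyGet? loop_names (-((rest.length : Int) + 1))).getD "", "in"] ++ l0) ++ "; do\n"
      ++ shell_loop_from_loops_alt commands loop_names rest (indent + 2)
      ++ pvSpaces indent ++ "done\n" := by
  have hm : (0 : Int) ≤ (rest.length : Int) := Int.natCast_nonneg _
  simp only [shell_loop_from_loops_alt, List.length_cons]
  have hn : ((rest.length + 1 : Nat) : Int) = (rest.length : Int) + 1 := by push_cast; ring
  rw [hn]
  have hrange : PySem.List.pyRange ((rest.length : Int) + 1 - 1) (-1) (-1)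
      = ((PySem.List.pyRange 0 (rest.length : Int) 1).reverse.map (fun x => x + 1)) ++ [(0 : Int)] := by
    rw [show ((rest.length : Int) + 1 - 1) = (rest.length : Int) by ring,
        PySem.List.pyRange_neg_one_eq_reverse]
    rw [show ((-1 : Int) + 1) = 0 by ring]
    rw [PySem.List.pyRange_one_cons (by omega), show ((0:Int)+1) = 1 from rfl, pyRange_shift]
    simp [List.map_reverse]
  rw [hrange, List.foldl_append, List.foldl_map]
  have hbase : indent + 2 * ((rest.length : Int) + 1) = (indent + 2) + 2 * (rest.length : Int) := by ring
  rw [hbase]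
  have hstep : ∀ (acc : String), ∀ x ∈ (PySem.List.pyRange 0 (rest.length : Int) 1).reverse,
      pvWrapStep loop_names (l0 :: rest) indent ((rest.length : Int) + 1) acc (x + 1)
        = pvWrapStep loop_names rest (indent + 2) (rest.length : Int) acc x := by
    intro acc x hx
    rw [List.mem_reverse, PySem.List.mem_pyRange_one] at hx
    simp only [pvWrapStep]
    have h1 : indent + 2 * (x + 1) = (indent + 2) + 2 * x := by ring
    have h2 : -((rest.length : Int) + 1 - (x + 1)) = -((rest.length : Int) - x) := by ring
    have h3 : PySem.List.pyGet? (l0 :: rest) (x + 1) = PySem.List.pyGet? rest x := by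
      rw [PySem.List.pyGet?_of_nonneg _ (by omega : (0:Int) ≤ x + 1),
          PySem.List.pyGet?_of_nonneg _ (by omega : (0:Int) ≤ x)]
      rw [show (x + 1).toNat = x.toNat + 1 by omega]
      simp
    rw [h1, h2, h3]
  rw [PySem.List.foldl_congr_mem _ _ _ _ hstep]
  -- now the k = 0 step
  simp only [List.foldl_cons, List.foldl_nil, pvWrapStep, PySem.List.pyGet?_zero_cons, Option.getD_some]
  rw [show indent + 2 * (0 : Int) = indent by ring,
      show -((rest.length : Int) + 1 - 0) = -((rest.length : Int) + 1) by ring]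
  rw [PySem.List.pyRange_neg_one_eq_reverse ((rest.length : Int) - 1) (-1)]
  rw [show ((-1:Int) + 1) = 0 from rfl, show ((rest.length:Int) - 1 + 1) = (rest.length:Int) by ring]

-- the two ports agree on every input (both read out-of-range names as getD "")
theorem ports_eq (commands loop_names : List String) (loops : List (List String)) (indent : Int) :
    shell_loop_from_loops commands loop_names loops indent
      = shell_loop_from_loops_alt commands loop_names loops indent := by
  induction loops generalizing indent with
  | nil =>
    simp only [shell_loop_from_loops, shell_loop_from_loops_alt, List.length_nil]
    rw [PySem.List.pyRange_neg_one_eq_nil (by omega)]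
    simp only [List.foldl_nil, Int.natCast_zero]
    rw [show indent + 2 * (0 : Int) = indent by ring]
    split_ifs with h
    · rfl
    · simp [String.append_assoc]
  | cons l0 rest ih =>
    rw [alt_cons]
    simp only [shell_loop_from_loops]
    rw [ih]

theorem shell_loop_from_loops_spec : Claim_equal_shell_loop_from_loops := by
  intro commands loop_names loops indent _ _
  exact ports_eq commands loop_names loops indent
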